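-- pv_equiv track=rewrite | github.com/natecollins/nofus-python | nofus/dbconnect.py | expand_value_location
-- ===== SOURCE A (Python) =====
-- def expand_value_location(query: str, nth: int, count: int) -> str:
--     '''
--     Replace a '?' with comma delimited '?'s at the nth occurrence.
--
--     Args:
--         query: The query string
--         nth: The nth occurrence of '?' to replace
--         count: Number of comma delimited '?' to insert
--
--     Returns:
--         str: The modified query string
--     '''
--     if nth <= 0 or count <= 1:
--         return query
--
--     replace_str = ",".join(["?"] * count)
--     match_count = 0
--     query_len = len(query)
--
--     for i in range(query_len):
--         if query[i] == '?':
--             match_count += 1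
--         if match_count == nth:
--             new_query = query[:i] + replace_str + query[i+1:]
--             return new_query
--     return query
-- ===== SOURCE B (Python) =====
-- def expand_value_location(query: str, nth: int, count: int) -> str:
--     if nth <= 0 or count <= 1:
--         return query
--     parts = query.split('?')
--     if len(parts) <= nth:
--         return query
--     replace_str = ",".join(["?"] * count)
--     return "?".join(parts[:nth]) + replace_str + "?".join(parts[nth:])
-- ===== Notes on version B (the rewrite author's own statement) =====
-- stated objective: simpler
-- what changed: Replaces A's character-by-character index scan with a match counter by split-on-'?' / rejoin: B splits the query into segments, guards on the segment count, and reassembles the first nth segments, the expanded placeholder, and the remaining segments.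
import Mathlib
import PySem

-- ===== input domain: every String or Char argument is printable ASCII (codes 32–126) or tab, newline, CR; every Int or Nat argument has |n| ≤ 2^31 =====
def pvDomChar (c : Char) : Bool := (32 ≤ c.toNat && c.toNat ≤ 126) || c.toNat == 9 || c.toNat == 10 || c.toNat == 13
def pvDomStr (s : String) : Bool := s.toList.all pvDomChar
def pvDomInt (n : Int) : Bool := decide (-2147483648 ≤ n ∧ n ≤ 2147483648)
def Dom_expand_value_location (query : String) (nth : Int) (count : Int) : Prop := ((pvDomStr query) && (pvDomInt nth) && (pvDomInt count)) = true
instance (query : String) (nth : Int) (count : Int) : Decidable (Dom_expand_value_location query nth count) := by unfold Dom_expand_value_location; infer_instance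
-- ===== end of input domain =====

-- B reassembles the result from the '?'-split segments instead of A's indexed scan with a match
-- counter; same value everywhere (objective: simpler).

-- ===== PORT A =====
-- the for-loop over range(len(query)) with state match_count and the early return;
-- query[:i] / query[i+1:] are List.take i / List.drop (i+1) (exact: 0 ≤ i < len)
def pvALoop (q : List Char) (nth : Int) (repl : List Char) (i : Nat) (mc : Int) : List Char :=
  if h : i < q.length then
    let mc' := if q[i] = '?' then mc + 1 else mc
    if mc' = nth then q.take i ++ repl ++ q.drop (i + 1)
    else pvALoop q nth repl (i + 1) mc'
  else q
termination_by q.length - i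

def expand_value_location (query : String) (nth : Int) (count : Int) : String :=
  if nth ≤ 0 ∨ count ≤ 1 then query
  else
    -- ",".join(["?"] * count)
    let repl := List.intercalate [','] (List.replicate count.toNat ['?'])
    String.ofList (pvALoop query.toList nth repl 0 0)

-- ===== PORT B =====
-- query.split('?') is List.splitOn '?', sep.join(parts) is List.intercalate sep parts (exact
-- for a one-character separator)
def expand_value_location_alt (query : String) (nth : Int) (count : Int) : String :=
  if nth ≤ 0 ∨ count ≤ 1 then query
  else
    let parts := query.toList.splitOn '?'
    if (parts.length : Int) ≤ nth then query
    else
      let replace_str := List.intercalate [','] (List.replicate count.toNat ['?'])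
      String.ofList (List.intercalate ['?'] (parts.take nth.toNat) ++ replace_str
                 ++ List.intercalate ['?'] (parts.drop nth.toNat))

-- ===== PRECONDITION & SPEC =====
def Spec_expand_value_location (query : String) (nth : Int) (count : Int) (out : String) : Prop := out = expand_value_location_alt query nth count
instance (query : String) (nth : Int) (count : Int) (out : String) : Decidable (Spec_expand_value_location query nth count out) := by unfold Spec_expand_value_location; infer_instance

-- ===== CLAIM (what is proved, stated in full; the proofs are below) =====
def Claim_equal_expand_value_location : Prop := ∀ (query : String) (nth : Int) (count : Int), Dom_expand_value_location query nth count → Spec_expand_value_location query nth count (expand_value_location query nth count)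

-- ===== LEMMAS AND PROOFS =====

/-- Structural version of A's index loop. -/
def pvScan (repl : List Char) : Int → List Char → List Char
  | _, [] => []
  | n, c :: cs =>
    if c = '?' then (if n = 1 then repl ++ cs else c :: pvScan repl (n - 1) cs)
    else c :: pvScan repl n cs

theorem pvALoop_eq_scan (q : List Char) (nth : Int) (repl : List Char) :
    ∀ k i mc, q.length - i ≤ k → mc < nth →
      pvALoop q nth repl i mc = q.take i ++ pvScan repl (nth - mc) (q.drop i) := by
  intro k
  induction k with
  | zero =>
    intro i mc hk _
    have hi : q.length ≤ i := by omega
    rw [pvALoop]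
    simp [Nat.not_lt.mpr hi, List.drop_eq_nil_of_le hi, List.take_of_length_le hi, pvScan]
  | succ k ih =>
    intro i mc hk hmc
    rw [pvALoop]
    by_cases h : i < q.length
    · have hdrop : q.drop i = q[i] :: q.drop (i + 1) := List.drop_eq_getElem_cons h
      have htake : q.take (i + 1) = q.take i ++ [q[i]] := by
        rw [List.take_add_one, List.getElem?_eq_getElem h]
        rfl
      simp only [h, dif_pos]
      by_cases hc : q[i] = '?'
      · simp only [hc, if_true]
        by_cases heq : mc + 1 = nth
        · rw [if_pos heq, hdrop, pvScan, if_pos hc, if_pos (by omega : nth - mc = 1)]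
          simp
        · rw [if_neg heq, ih (i + 1) (mc + 1) (by omega) (by omega), hdrop, pvScan, if_pos hc,
            if_neg (by omega : ¬ nth - mc = 1),
            (by omega : nth - (mc + 1) = nth - mc - 1)]
          rw [htake, List.append_assoc, List.singleton_append]
      · simp only [hc, if_false]
        rw [if_neg (by omega : ¬ mc = nth), ih (i + 1) mc (by omega) hmc, hdrop, pvScan,
          if_neg hc]
        rw [htake, List.append_assoc, List.singleton_append]
    · simp only [h, dif_neg, not_false_eq_true]
      have hi : q.length ≤ i := by omega
      rw [List.drop_eq_nil_of_le hi, List.take_of_length_le hi, pvScan]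
      simp

theorem splitOn_q_ne_nil (cs : List Char) : cs.splitOn '?' ≠ [] := by
  simp only [List.splitOn]
  exact List.splitOnP_ne_nil _ cs

theorem intercalate_modifyHead (c : Char) (l : List (List Char)) (hl : l ≠ []) :
    List.intercalate ['?'] (l.modifyHead (List.cons c)) = c :: List.intercalate ['?'] l := by
  cases l with
  | nil => exact absurd rfl hl
  | cons x rest =>
    cases rest with
    | nil => simp [List.intercalate]
    | cons y t => simp [List.intercalate]

theorem pvScan_eq_split (repl : List Char) :
    ∀ (cs : List Char) (n : Nat), 1 ≤ n →
      pvScan repl (n : Int) cs =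
        if (cs.splitOn '?').length ≤ n then cs
        else List.intercalate ['?'] ((cs.splitOn '?').take n) ++ repl
             ++ List.intercalate ['?'] ((cs.splitOn '?').drop n) := by
  intro cs
  induction cs with
  | nil =>
    intro n hn
    rw [pvScan]
    have hl : (List.splitOn '?' ([] : List Char)).length ≤ n := by
      simp only [List.splitOn, List.splitOnP_nil, List.length_cons, List.length_nil]
      omega
    rw [if_pos hl]
  | cons c cs ih =>
    intro n hn
    obtain ⟨m, rfl⟩ : ∃ m, n = m + 1 := ⟨n - 1, by omega⟩
    have hsplit_cons : (c :: cs).splitOn '?' =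
        if c = '?' then [] :: cs.splitOn '?' else (cs.splitOn '?').modifyHead (List.cons c) := by
      simp only [List.splitOn, List.splitOnP_cons, beq_iff_eq]
    obtain ⟨p0, ps, hps⟩ := List.exists_cons_of_ne_nil (splitOn_q_ne_nil cs)
    by_cases hc : c = '?'
    · rw [hsplit_cons, if_pos hc, pvScan, if_pos hc]
      by_cases h1 : m = 0
      · subst h1
        rw [if_pos (by norm_num)]
        have hlen : ¬ ([] :: cs.splitOn '?').length ≤ 1 := by simp [hps]
        rw [if_neg hlen]
        simp only [List.take_succ_cons, List.take_zero, List.drop_succ_cons, List.drop_zero]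
        rw [List.intercalate_splitOn cs '?']
        simp [List.intercalate]
      · rw [if_neg (by omega : ¬ ((m + 1 : Nat) : Int) = 1),
          (by push_cast; ring : ((m + 1 : Nat) : Int) - 1 = ((m : Nat) : Int)),
          ih m (by omega)]
        have hlen_iff : (([] :: cs.splitOn '?').length ≤ m + 1) ↔ ((cs.splitOn '?').length ≤ m) := by
          simp only [List.length_cons]; omega
        by_cases hg : (cs.splitOn '?').length ≤ m
        · rw [if_pos hg, if_pos (hlen_iff.mpr hg)]
        · rw [if_neg hg, if_neg (fun h => hg (hlen_iff.mp h))]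
          rw [List.take_succ_cons, List.drop_succ_cons, hc]
          have hne : (cs.splitOn '?').take m ≠ [] := by
            rw [hps]
            cases h' : m with
            | zero => omega
            | succ l => simp
          obtain ⟨q0, qs, hqs⟩ := List.exists_cons_of_ne_nil hne
          rw [hqs]
          simp [List.intercalate]
    · rw [hsplit_cons, if_neg hc, pvScan, if_neg hc, ih (m + 1) hn]
      have hlen : ((cs.splitOn '?').modifyHead (List.cons c)).length = (cs.splitOn '?').length := by
        simp
      by_cases hg : (cs.splitOn '?').length ≤ m + 1
      · rw [if_pos hg, if_pos (by rw [hlen]; exact hg)]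
      · rw [if_neg hg, if_neg (by rw [hlen]; exact hg)]
        have htake : ((cs.splitOn '?').modifyHead (List.cons c)).take (m + 1)
            = ((cs.splitOn '?').take (m + 1)).modifyHead (List.cons c) := by
          rw [hps]; simp
        have hdrop : ((cs.splitOn '?').modifyHead (List.cons c)).drop (m + 1)
            = (cs.splitOn '?').drop (m + 1) := by
          rw [hps]; simp
        rw [htake, hdrop]
        rw [intercalate_modifyHead c _ (by rw [hps]; simp)]
        simp

-- ===== VERDICT (by name: the statement is the Claim_ definition above) =====
theorem expand_value_location_spec : Claim_equal_expand_value_location := by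
  unfold Claim_equal_expand_value_location
  intro query nth count _
  unfold Spec_expand_value_location expand_value_location expand_value_location_alt
  by_cases hguard : nth ≤ 0 ∨ count ≤ 1
  · rw [if_pos hguard, if_pos hguard]
  · rw [if_neg hguard, if_neg hguard]
    set n := nth.toNat with hn
    have hnn : nth = (n : Int) := by omega
    rw [hnn]
    have h0 : pvALoop query.toList ((n : Int))
        (List.intercalate [','] (List.replicate count.toNat ['?'])) 0 0
        = pvScan (List.intercalate [','] (List.replicate count.toNat ['?'])) ((n : Int))
            query.toList := by
      rw [pvALoop_eq_scan query.toList ((n : Int)) _ query.toList.length 0 0 (by omega)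
        (by omega)]
      simp
    simp only [h0]
    rw [pvScan_eq_split _ query.toList n (by omega)]
    by_cases hg : (query.toList.splitOn '?').length ≤ n
    · rw [if_pos hg, if_pos (by exact_mod_cast hg : ((query.toList.splitOn '?').length : Int) ≤ (n : Int))]
      simp
    · rw [if_neg hg, if_neg (by
        intro hcon
        exact hg (by exact_mod_cast hcon))]
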